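-- pv_equiv track=rewrite | github.com/destinydigits/destinydigits-backend | tools/name_correction_engine.py | suggest_letters_to_add
-- ===== SOURCE A (Python) =====
-- from string import ascii_uppercase
--
-- def suggest_letters_to_add(name, expression, destiny):
--     ideal_letters = []
--     formatted_suggestions = []
--
--     for ch in ascii_uppercase:
--         new_name = name + ch
--         new_expr = get_expression_number(new_name)
--         if new_expr == destiny:
--             ideal_letters.append(ch)
--
--     # Format output without examples
--     for ch in ideal_letters[:5]:
--         formatted_suggestions.append(f"Try adding one extra '{ch}' to your name")
--
--     return formatted_suggestions
--
-- def get_expression_number(name):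
--     letter_map = {
--         'A':1, 'B':2, 'C':3, 'D':4, 'E':5, 'F':6, 'G':7, 'H':8, 'I':9,
--         'J':1, 'K':2, 'L':3, 'M':4, 'N':5, 'O':6, 'P':7, 'Q':8, 'R':9,
--         'S':1, 'T':2, 'U':3, 'V':4, 'W':5, 'X':6, 'Y':7, 'Z':8
--     }
--
--     name = name.upper()
--     total = sum(letter_map.get(char, 0) for char in name if char.isalpha())
--
--     # Reduce unless master number
--     while total not in [11, 22, 33] and total > 9:
--         total = sum(int(d) for d in str(total))
--
--     return total
-- ===== SOURCE B (Python) =====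
-- def _letter_value(c):
--     o = ord(c)
--     if 65 <= o <= 90:
--         return (o - 65) % 9 + 1
--     if 97 <= o <= 122:
--         return (o - 97) % 9 + 1
--     return 0
--
-- def _reduce(total):
--     if total <= 9 or total in (11, 22, 33):
--         return total
--     s = 0
--     for d in str(total):
--         s += int(d)
--     return _reduce(s)
--
-- def suggest_letters_to_add(name, expression, destiny):
--     base = 0
--     for c in name:
--         base += _letter_value(c)
--     good = [_reduce(base + v) == destiny for v in range(1, 10)]
--     res = []
--     for i in range(26):
--         if good[i % 9]:
--             res.append(f"Try adding one extra '{chr(65 + i)}' to your name")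
--             if len(res) == 5:
--                 break
--     return res
-- ===== Notes on version B (the rewrite author's own statement) =====
-- stated objective: faster
-- what changed: Instead of recomputing the full expression number of name+ch for each of the 26 candidate letters (26 dict-lookup scans of the name), B computes the raw letter sum once with the arithmetic formula (ord-65)%9+1 (no dict), builds a 9-entry boolean table of which increments 1..9 reduce to the destiny, and selects letters by table lookup at i%9, stopping as soon as 5 suggestions are collected.
import Mathlib
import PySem

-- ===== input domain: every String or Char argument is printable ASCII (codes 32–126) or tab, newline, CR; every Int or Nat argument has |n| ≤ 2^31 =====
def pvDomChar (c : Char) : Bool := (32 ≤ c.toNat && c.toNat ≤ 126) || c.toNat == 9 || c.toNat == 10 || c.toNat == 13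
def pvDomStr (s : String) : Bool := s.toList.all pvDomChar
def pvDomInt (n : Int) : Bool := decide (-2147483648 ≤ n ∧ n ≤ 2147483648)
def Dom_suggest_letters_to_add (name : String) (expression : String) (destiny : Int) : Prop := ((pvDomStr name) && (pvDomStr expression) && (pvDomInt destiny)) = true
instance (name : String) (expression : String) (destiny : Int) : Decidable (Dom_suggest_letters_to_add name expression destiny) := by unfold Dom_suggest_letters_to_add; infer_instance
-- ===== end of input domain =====

-- B replaces A's 26 full re-scans of the name (one get_expression_number per candidate letter, via a
-- letter dict) by one arithmetic pass over the name ((ord-65)%9+1 instead of the dict), a 9-entry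
-- boolean table of accepting increments, and a 26-step loop that stops as soon as 5 suggestions exist.

-- ===== PORT A =====

-- module-level data of A: the letter_map dict and string.ascii_uppercase
def pvLetterMap : PySem.Dict Char Int := PySem.Dict.ofList
  [('A',1), ('B',2), ('C',3), ('D',4), ('E',5), ('F',6), ('G',7), ('H',8), ('I',9),
   ('J',1), ('K',2), ('L',3), ('M',4), ('N',5), ('O',6), ('P',7), ('Q',8), ('R',9),
   ('S',1), ('T',2), ('U',3), ('V',4), ('W',5), ('X',6), ('Y',7), ('Z',8)]

def pvAsciiUppercase : List Char :=
  ['A','B','C','D','E','F','G','H','I','J','K','L','M','N','O','P','Q','R','S','T','U','V','W','X','Y','Z']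

def pvFmt (ch : Char) : String := "Try adding one extra '" ++ String.singleton ch ++ "' to your name"

-- A's 'while total not in [11,22,33] and total > 9' loop.  Fuel total.toNat+1 is exact: the body only
-- runs with total > 9, where the digit sum is strictly smaller and nonnegative, so Python performs at
-- most total-9 iterations.  int(d) is ported as d.toNat - 48, exact for the digit characters that
-- str(total) yields for total > 9.
def pvReduceGo : Nat → Int → Int
  | 0, total => total
  | fuel+1, total =>
    if total ∉ ([11, 22, 33] : List Int) ∧ total > 9 then
      pvReduceGo fuel (((PySem.Int.toChars total).map (fun d => (d.toNat : Int) - 48)).sum)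
    else total

def pvReduce (total : Int) : Int := pvReduceGo (total.toNat + 1) total

def get_expression_number (name : String) : Int :=
  let nameU := PySem.Chars.upper name.toList
  let total := ((nameU.filter PySem.Chars.isalpha).map (fun c => pvLetterMap.getD c 0)).sum
  pvReduce total

def suggest_letters_to_add (name : String) (expression : String) (destiny : Int) : List String :=
  let ideal_letters := pvAsciiUppercase.foldl (fun acc ch =>
    let new_name := name ++ String.singleton ch
    if get_expression_number new_name == destiny then acc ++ [ch] else acc) []
  (PySem.List.slice ideal_letters none (some 5)).foldl (fun acc ch => acc ++ [pvFmt ch]) []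

-- ===== PORT B =====

-- Source B's _letter_value: pure arithmetic on the character code, no dict
def altLetterValue (c : Char) : Int :=
  let o : Int := (c.toNat : Int)
  if 65 ≤ o ∧ o ≤ 90 then PySem.Int.mod (o - 65) 9 + 1
  else if 97 ≤ o ∧ o ≤ 122 then PySem.Int.mod (o - 97) 9 + 1
  else 0

-- Source B's recursive _reduce; recursion depth is at most total-9 for total > 9, so fuel total.toNat+1
-- is exact.  int(d) over the digits of str(total) is ported as d.toNat - 48, exact for total > 9.
def altReduceGo : Nat → Int → Int
  | 0, total => total
  | fuel+1, total =>
    if total ≤ 9 ∨ total ∈ ([11, 22, 33] : List Int) then total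
    else altReduceGo fuel ((PySem.Int.toChars total).foldl (fun s d => s + ((d.toNat : Int) - 48)) 0)

def altReduce (total : Int) : Int := altReduceGo (total.toNat + 1) total

def altFmt (i : Nat) : String :=
  "Try adding one extra '" ++ String.singleton (Char.ofNat (65 + i)) ++ "' to your name"

-- Source B's 'for i in range(26)' loop with its 'break' once 5 suggestions are collected;
-- good[i % 9] is ported with getD: i % 9 < 9 = good.length, so the index is always in range.
def altLoop (good : List Bool) : List Nat → List String → List String
  | [], res => res
  | i :: rest, res =>
    if good.getD (i % 9) false then
      let res' := res ++ [altFmt i]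
      if res'.length == 5 then res' else altLoop good rest res'
    else altLoop good rest res

def suggest_letters_to_add_alt (name : String) (expression : String) (destiny : Int) : List String :=
  let base := name.toList.foldl (fun s c => s + altLetterValue c) 0
  let good := (PySem.List.pyRange 1 10 1).map (fun v => altReduce (base + v) == destiny)
  -- range(26) starts at 0 with step 1, so it is ported as List.range 26 (indices are the Nats 0..25)
  altLoop good (List.range 26) []

-- ===== PRECONDITION & SPEC =====
def Spec_suggest_letters_to_add (name : String) (expression : String) (destiny : Int) (out : List String) : Prop := out = suggest_letters_to_add_alt name expression destiny
instance (name : String) (expression : String) (destiny : Int) (out : List String) : Decidable (Spec_suggest_letters_to_add name expression destiny out) := by unfold Spec_suggest_letters_to_add; infer_instance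

-- ===== CLAIM (what is proved, stated in full; the proofs are below) =====
def Claim_equal_suggest_letters_to_add : Prop := ∀ (name : String) (expression : String) (destiny : Int), Dom_suggest_letters_to_add name expression destiny → Spec_suggest_letters_to_add name expression destiny (suggest_letters_to_add name expression destiny)

-- ===== LEMMAS AND PROOFS =====

-- A's raw letter sum of a char list (upper, filter isalpha, dict lookup)
def pvBaseA (l : List Char) : Int :=
  (((PySem.Chars.upper l).filter PySem.Chars.isalpha).map (fun c => pvLetterMap.getD c 0)).sum

-- per-char contribution on A's side
def pvContrib (c : Char) : Int :=
  if PySem.Chars.isalpha (PySem.Chars.upperChar c) then pvLetterMap.getD (PySem.Chars.upperChar c) 0 else 0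

lemma pvBaseA_eq_sum_contrib (l : List Char) : pvBaseA l = (l.map pvContrib).sum := by
  induction l with
  | nil => rfl
  | cons c t ih =>
    simp only [pvBaseA, PySem.Chars.upper, List.map_cons, List.filter_cons, List.sum_cons] at *
    by_cases h : PySem.Chars.isalpha (PySem.Chars.upperChar c) <;>
      simp [h, pvContrib, ← ih]

-- on all codes < 128 the dict contribution equals B's arithmetic letter value (checked by decide)
set_option maxRecDepth 8000 in
lemma pv_contrib_table :
    ((List.range 128).all (fun n => pvContrib (Char.ofNat n) == altLetterValue (Char.ofNat n))) = true := by
  decide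

lemma pv_contrib_eq (c : Char) (h : pvDomChar c = true) : pvContrib c = altLetterValue c := by
  have hlt : c.toNat < 128 := by
    unfold pvDomChar at h
    simp only [Bool.or_eq_true, Bool.and_eq_true, decide_eq_true_eq, beq_iff_eq] at h
    omega
  have := List.all_eq_true.mp pv_contrib_table c.toNat (List.mem_range.mpr hlt)
  rwa [Char.ofNat_toNat, beq_iff_eq] at this

lemma pv_base_eq (l : List Char) (h : l.all pvDomChar = true) :
    pvBaseA l = l.foldl (fun s c => s + altLetterValue c) 0 := by
  rw [pvBaseA_eq_sum_contrib, PySem.List.foldl_add, Int.zero_add]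
  exact congrArg List.sum (List.map_congr_left fun c hc =>
    pv_contrib_eq c (List.all_eq_true.mp h c hc))

-- the two reduction loops agree (complementary stop conditions, same digit sum)
lemma pv_reduce_go_eq (fuel : Nat) (t : Int) : pvReduceGo fuel t = altReduceGo fuel t := by
  induction fuel generalizing t with
  | zero => rfl
  | succ f ih =>
    have hsum : (((PySem.Int.toChars t).map (fun d => (d.toNat : Int) - 48)).sum)
        = (PySem.Int.toChars t).foldl (fun s d => s + ((d.toNat : Int) - 48)) 0 := by
      rw [PySem.List.foldl_add, Int.zero_add]
    simp only [pvReduceGo, altReduceGo]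
    by_cases h1 : t ∉ ([11, 22, 33] : List Int) ∧ t > 9
    · rw [if_pos h1,
        if_neg (fun hor => hor.elim (fun h => absurd h (not_le.mpr h1.2)) (fun h => h1.1 h)),
        ← hsum]
      exact ih _
    · rw [if_neg h1,
        if_pos (by rcases not_and_or.mp h1 with h | h
                   · exact Or.inr (not_not.mp h)
                   · exact Or.inl (by omega))]

lemma pv_reduce_eq (t : Int) : pvReduce t = altReduce t := by
  unfold pvReduce altReduce; exact pv_reduce_go_eq _ t

-- A's expression number of name + one uppercase letter
lemma pv_ascii_facts (ch : Char) (h : ch ∈ pvAsciiUppercase) :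
    PySem.Chars.upperChar ch = ch ∧ PySem.Chars.isalpha ch = true := by
  fin_cases h <;> exact ⟨by decide, by decide⟩

lemma pv_expr_append (name : String) (ch : Char) (h : ch ∈ pvAsciiUppercase) :
    get_expression_number (name ++ String.singleton ch)
      = pvReduce (pvBaseA name.toList + pvLetterMap.getD ch 0) := by
  obtain ⟨hu, ha⟩ := pv_ascii_facts ch h
  simp [get_expression_number, pvBaseA, PySem.Chars.upper, List.filter_append, ha, hu]

-- B's loop collects the first 5 accepted suggestions
lemma pv_altLoop_eq (good : List Bool) (l : List Nat) (res : List String) (h : res.length < 5) :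
    altLoop good l res
      = res ++ ((l.filter (fun i => good.getD (i % 9) false)).map altFmt).take (5 - res.length) := by
  induction l generalizing res with
  | nil => simp [altLoop]
  | cons i rest ih =>
    simp only [altLoop, List.filter_cons]
    by_cases hg : good.getD (i % 9) false = true
    · simp only [hg, if_true, List.map_cons]
      by_cases h5 : (res ++ [altFmt i]).length == 5
      · have h4 : res.length = 4 := by simpa using h5
        simp [h4]
      · have hlen : (res ++ [altFmt i]).length < 5 := by
          simp at h5 ⊢; omega
        rw [if_neg (by simpa using h5), ih _ hlen]
        have hstep : 5 - res.length = (5 - (res ++ [altFmt i]).length) + 1 := by simp; omega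
        simp [hstep, List.take_succ_cons]
    · rw [if_neg hg, if_neg hg, ih _ h]

-- the 26 candidate letters: index i of range(26) corresponds to the letter chr(65+i)
def pvChr (i : Nat) : Char := Char.ofNat (65 + i)

lemma pv_ascii_as_range : pvAsciiUppercase = (List.range 26).map pvChr := by decide

lemma pv_letter_facts (i : Nat) (hi : i < 26) :
    pvChr i ∈ pvAsciiUppercase ∧ pvLetterMap.getD (pvChr i) 0 = ((i % 9 : Nat) : Int) + 1 := by
  interval_cases i <;> exact ⟨by decide, by decide⟩

lemma pv_good_getD (f : Int → Bool) (k : Nat) (hk : k < 9) :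
    ((PySem.List.pyRange 1 10 1).map f).getD k false = f (((k : Nat) : Int) + 1) := by
  have hpr : PySem.List.pyRange 1 10 1 = [1, 2, 3, 4, 5, 6, 7, 8, 9] := by decide
  rw [hpr]
  interval_cases k <;> norm_num [List.getD]

-- per index i < 26, A's acceptance test equals B's table lookup
lemma pv_cond_eq (B destiny : Int) (name : String) (hB : pvBaseA name.toList = B)
    (i : Nat) (hi : i < 26) :
    (get_expression_number (name ++ String.singleton (pvChr i)) == destiny)
      = ((PySem.List.pyRange 1 10 1).map (fun v => altReduce (B + v) == destiny)).getD (i % 9) false := by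
  obtain ⟨hmem, hval⟩ := pv_letter_facts i hi
  rw [pv_good_getD _ _ (Nat.mod_lt _ (by omega)), pv_expr_append name _ hmem, hval, hB, pv_reduce_eq]

-- ===== VERDICT (by name: the statement is the Claim_ definition above) =====
theorem suggest_letters_to_add_spec : Claim_equal_suggest_letters_to_add := by
  intro name expression destiny hdom
  have hname : name.toList.all pvDomChar = true := by
    unfold Dom_suggest_letters_to_add pvDomStr at hdom
    simp only [Bool.and_eq_true] at hdom
    exact hdom.1.1
  unfold Spec_suggest_letters_to_add suggest_letters_to_add suggest_letters_to_add_alt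
  simp only [PySem.List.foldl_append_if_eq_filter, List.nil_append,
    PySem.List.foldl_append_singleton_eq_map]
  rw [show ((5:Int)) = ((5:Nat):Int) from rfl, PySem.List.slice_to_natCast,
    pv_altLoop_eq _ _ [] (by decide), pv_ascii_as_range, List.filter_map,
    List.filter_congr (fun i hi => by
      simpa [Function.comp_apply] using
        pv_cond_eq _ destiny name (pv_base_eq _ hname) i (List.mem_range.mp hi))]
  have hfmt : pvFmt ∘ pvChr = altFmt := by
    funext i; rfl
  simp [List.map_take, hfmt]
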